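-- pv_equiv track=rewrite | github.com/homer1013/BasaltOS | tools/basaltos_config_server.py | _extract_build_error_detail
-- ===== SOURCE A (Python) =====
-- def _extract_build_error_detail(output: str) -> str:
--     lines = [ln.strip() for ln in str(output or "").splitlines() if ln.strip()]
--     if not lines:
--         return ""
--     # Prefer concrete compiler/tool error lines.
--     for ln in lines:
--         low = ln.lower()
--         if " error:" in low or low.startswith("error:") or "fatal error:" in low:
--             return ln
--         if "undefined reference" in low or "collect2: error" in low:
--             return ln
--     # Fall back to the last non-empty line if no explicit marker was found.
--     return lines[-1]
-- ===== SOURCE B (Python) =====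
-- def _extract_build_error_detail(output: str) -> str:
--     # Reverse scan, no early exit: the last marker line seen while walking
--     # backwards is the first error line in forward order, and the first
--     # non-empty line seen backwards is the forward last-line fallback.
--     err = ""
--     fallback = ""
--     for raw in reversed(str(output or "").splitlines()):
--         ln = raw.strip()
--         if not ln:
--             continue
--         if not fallback:
--             fallback = ln
--         low = ln.lower()
--         if (" error:" in low or low.startswith("error:") or "fatal error:" in low
--                 or "undefined reference" in low or "collect2: error" in low):
--             err = ln
--     return err or fallback
-- ===== Notes on version B (the rewrite author's own statement) =====
-- stated objective: alternative
-- what changed: Replaces A's build-filtered-list-then-forward-scan-with-early-return by a single backward pass with two accumulators and no early exit: the last marker line seen in reverse is the first forward error line, and the first non-empty line seen in reverse is the fallback last line.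
import Mathlib
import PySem

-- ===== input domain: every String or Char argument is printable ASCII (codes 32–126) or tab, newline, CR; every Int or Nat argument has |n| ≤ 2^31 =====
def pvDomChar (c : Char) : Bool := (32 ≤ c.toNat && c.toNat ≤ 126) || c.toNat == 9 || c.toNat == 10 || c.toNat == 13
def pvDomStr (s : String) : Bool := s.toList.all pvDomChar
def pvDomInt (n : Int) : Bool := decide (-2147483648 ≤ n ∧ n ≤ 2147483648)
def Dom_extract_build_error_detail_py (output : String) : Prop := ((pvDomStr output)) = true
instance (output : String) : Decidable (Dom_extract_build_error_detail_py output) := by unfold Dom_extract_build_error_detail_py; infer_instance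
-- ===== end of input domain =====

-- B replaces A's filtered list and forward early-return scan by one backward pass
-- with two accumulators and no early exit (objective: alternative).

-- ===== PORT A =====
def pvMarkA1 (low : String) : Bool :=
  PySem.Str.isIn " error:" low || PySem.Str.startswith low "error:" ||
    PySem.Str.isIn "fatal error:" low

def pvMarkA2 (low : String) : Bool :=
  PySem.Str.isIn "undefined reference" low || PySem.Str.isIn "collect2: error" low

-- the 'for ln in lines' loop of A: first line carrying a marker
def pvFindErrA : List String → Option String
  | [] => none
  | ln :: t =>
    let low := PySem.Str.lower ln
    if pvMarkA1 low then some ln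
    else if pvMarkA2 low then some ln
    else pvFindErrA t

def extract_build_error_detail_py (output : String) : String :=
  -- str(output or "") : 'output or ""' is output unless output is the empty string
  let lines := ((PySem.Str.splitlines (if output = "" then "" else output)).filter
      (fun ln => PySem.Str.strip ln ≠ "")).map PySem.Str.strip
  if lines = [] then ""
  else
    match pvFindErrA lines with
    | some ln => ln
    -- lines[-1]: lines ≠ [] in this branch, so pyGet? never returns none (getD "" unreachable)
    | none => (PySem.List.pyGet? lines (-1)).getD ""

-- ===== PORT B =====
def pvMarkB (low : String) : Bool :=
  PySem.Str.isIn " error:" low || PySem.Str.startswith low "error:" ||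
    PySem.Str.isIn "fatal error:" low || PySem.Str.isIn "undefined reference" low ||
    PySem.Str.isIn "collect2: error" low

-- B's backward loop: state is (err, fallback), both overwritten as in Source B
def pvLoopB : List String → String × String → String × String
  | [], st => st
  | raw :: t, (err, fb) =>
    let ln := PySem.Str.strip raw
    if ln = "" then pvLoopB t (err, fb)
    else
      pvLoopB t ((if pvMarkB (PySem.Str.lower ln) then ln else err),
                 (if fb = "" then ln else fb))

def extract_build_error_detail_py_alt (output : String) : String :=
  let st := pvLoopB ((PySem.Str.splitlines (if output = "" then "" else output)).reverse) ("", "")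
  -- 'return err or fallback'
  if st.1 = "" then st.2 else st.1

-- ===== PRECONDITION & SPEC =====
def Spec_extract_build_error_detail_py (output : String) (out : String) : Prop := out = extract_build_error_detail_py_alt output
instance (output : String) (out : String) : Decidable (Spec_extract_build_error_detail_py output out) := by unfold Spec_extract_build_error_detail_py; infer_instance

-- ===== CLAIM (what is proved, stated in full; the proofs are below) =====
def Claim_equal_extract_build_error_detail_py : Prop := ∀ (output : String), Dom_extract_build_error_detail_py output → Spec_extract_build_error_detail_py output (extract_build_error_detail_py output)

-- ===== LEMMAS AND PROOFS =====
lemma pvMarkB_eq (low : String) : pvMarkB low = (pvMarkA1 low || pvMarkA2 low) := by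
  simp [pvMarkB, pvMarkA1, pvMarkA2, Bool.or_assoc]

-- A's forward scan is find? of the combined marker predicate
lemma pvFindErrA_eq_find? (l : List String) :
    pvFindErrA l = l.find? (fun ln => pvMarkB (PySem.Str.lower ln)) := by
  induction l with
  | nil => rfl
  | cons ln t ih =>
    by_cases h1 : pvMarkA1 (PySem.Str.lower ln) = true <;>
      by_cases h2 : pvMarkA2 (PySem.Str.lower ln) = true <;>
        simp [pvFindErrA, pvMarkB_eq, h1, h2, ih]

-- B's backward loop, characterised: err = last marker line in traversal order
-- (via find? on the reversed list), fb = first non-empty stripped line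
lemma pvLoopB_spec (ls : List String) (err fb : String) :
    pvLoopB ls (err, fb) =
      (let ls' := (ls.filter (fun l => PySem.Str.strip l ≠ "")).map PySem.Str.strip
       (((ls'.reverse.find? (fun ln => pvMarkB (PySem.Str.lower ln))).getD err),
        (if fb = "" then ls'.headD fb else fb))) := by
  induction ls generalizing err fb with
  | nil => simp [pvLoopB]
  | cons raw t ih =>
    by_cases h : PySem.Str.strip raw = ""
    · simp only [pvLoopB, h, ih]
      simp [h]
    · have hln : PySem.Str.strip raw ≠ "" := h
      simp only [pvLoopB, if_neg h, ih]
      have hfl : ((raw :: t).filter (fun l => PySem.Str.strip l ≠ "")).map PySem.Str.strip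
          = PySem.Str.strip raw :: (t.filter (fun l => PySem.Str.strip l ≠ "")).map PySem.Str.strip := by
        rw [List.filter_cons, if_pos (by simp [h]), List.map_cons]
      simp only [hfl, Prod.mk.injEq]
      constructor
      · -- err component: find? over (ts'.reverse ++ [ln])
        rw [List.reverse_cons, List.find?_append]
        cases hfind : (((t.filter (fun l => PySem.Str.strip l ≠ "")).map PySem.Str.strip).reverse.find?
            (fun ln => pvMarkB (PySem.Str.lower ln))) with
        | some v => simp
        | none =>
          by_cases hm : pvMarkB (PySem.Str.lower (PySem.Str.strip raw)) = true <;>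
            simp [hm]
      · -- fb component
        by_cases hfb : fb = ""
        · simp [hfb, hln]
        · simp [hfb]

-- lines[-1] on a non-empty list is its last element
lemma pyGet_neg_one (l : List String) (hl : l ≠ []) :
    (PySem.List.pyGet? l (-1)).getD "" = l.getLastD "" := by
  have hlen : 0 < l.length := List.length_pos_iff.mpr hl
  unfold PySem.List.pyGet? PySem.List.pyIdx?
  rw [if_neg (by omega), if_pos (by omega)]
  simp [List.getLastD_eq_getLast?, List.getLast?_eq_getElem?]

-- every element of A's filtered/stripped line list is non-empty
lemma mem_lines_ne_empty (ls : List String) (v : String)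
    (hv : v ∈ (ls.filter (fun l => PySem.Str.strip l ≠ "")).map PySem.Str.strip) : v ≠ "" := by
  rcases List.mem_map.mp hv with ⟨l, hl, rfl⟩
  exact (List.mem_filter.mp hl).2 |> of_decide_eq_true

-- ===== VERDICT (by name: the statement is the Claim_ definition above) =====
theorem extract_build_error_detail_py_spec : Claim_equal_extract_build_error_detail_py := by
  intro output _
  unfold Spec_extract_build_error_detail_py extract_build_error_detail_py extract_build_error_detail_py_alt
  rw [pvLoopB_spec]
  simp only [List.filter_reverse, List.map_reverse, List.reverse_reverse]
  set L := (((PySem.Str.splitlines (if output = "" then "" else output)).filter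
      (fun ln => PySem.Str.strip ln ≠ "")).map PySem.Str.strip) with hL
  rw [pvFindErrA_eq_find?]
  by_cases h : L = []
  · simp [h]
  · rw [if_neg h]
    cases hf : L.find? (fun ln => pvMarkB (PySem.Str.lower ln)) with
    | some v =>
      have hv : v ≠ "" :=
        mem_lines_ne_empty _ _ (by rw [← hL]; exact List.mem_of_find?_eq_some hf)
      simp [hv]
    | none =>
      simp [pyGet_neg_one L h]
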